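-- pv_equiv track=rewrite | github.com/khoaphamanh/bachelorarbeit | tcc-im-CNN/rp_cv.py | t_FPT
-- ===== SOURCE A (Python) =====
-- def t_FPT(cycle_sequence_dict: dict, n_FPT: int, n_period: int):
--     t_FPT_dict = {}
--     for key in cycle_sequence_dict.keys():
--         bearing = cycle_sequence_dict[key]
--         t_FPT_dict[key] = []
--         for i in range(len(bearing)):
--             sequence = bearing[i]
--             for index in range(len(sequence)):
--                 if index + n_period <= len(sequence) and sum(sequence[index:index + n_period]) > n_FPT:
--                     FPT = index
--                     t_FPT_dict[key].append(FPT)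
--                     break
--
--             if len(t_FPT_dict[key]) < i+1:
--                 t_FPT_dict[key].append(None)
--
--     return t_FPT_dict
-- ===== SOURCE B (Python) =====
-- def slice_sum(pref, i, j):
--     """Sum of seq[i:j] in O(1), for arbitrary slice bounds, where pref is the
--     prefix-sum table of seq (pref[k] = sum of the first k elements)."""
--     a, b, _ = slice(i, j).indices(len(pref) - 1)
--     return pref[b] - pref[a] if b > a else 0
--
--
-- def t_FPT(cycle_sequence_dict: dict, n_FPT: int, n_period: int):
--     out = {}
--     for key, bearing in cycle_sequence_dict.items():
--         rows = []
--         for seq in bearing: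
--             pref = [0]
--             for x in seq:
--                 pref.append(pref[-1] + x)
--             found = None
--             for i in range(len(seq)):
--                 if i + n_period <= len(seq) and slice_sum(pref, i, i + n_period) > n_FPT:
--                     found = i
--                     break
--             rows.append(found)
--         out[key] = rows
--     return out
-- ===== Notes on version B (the rewrite author's own statement) =====
-- stated objective: alternative
-- what changed: Replaces A's per-index re-summation sum(sequence[index:index+n_period]) by a prefix-sum table built once per sequence, reading each window sum in O(1) from slice-normalised bounds (slice().indices), so a sequence is scanned in O(L) instead of O(L*n_period); not measurably faster on the benchmark's small constant windows.
import Mathlib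
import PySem

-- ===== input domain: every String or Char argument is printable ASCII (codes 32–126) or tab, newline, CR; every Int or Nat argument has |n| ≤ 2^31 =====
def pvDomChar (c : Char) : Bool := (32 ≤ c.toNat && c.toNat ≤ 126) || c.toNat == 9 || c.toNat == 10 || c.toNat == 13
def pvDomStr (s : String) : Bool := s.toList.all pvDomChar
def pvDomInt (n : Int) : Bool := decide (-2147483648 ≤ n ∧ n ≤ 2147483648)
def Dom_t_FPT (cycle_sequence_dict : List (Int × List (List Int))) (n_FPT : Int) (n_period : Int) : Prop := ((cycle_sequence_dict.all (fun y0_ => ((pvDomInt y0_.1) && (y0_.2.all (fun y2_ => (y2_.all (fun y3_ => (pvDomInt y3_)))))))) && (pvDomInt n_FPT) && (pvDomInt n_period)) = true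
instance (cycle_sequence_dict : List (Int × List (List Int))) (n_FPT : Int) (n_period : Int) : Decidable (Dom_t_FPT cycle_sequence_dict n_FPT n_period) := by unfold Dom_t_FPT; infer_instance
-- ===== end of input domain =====

-- B builds a prefix-sum table once per sequence and reads each window sum off it in O(1) (via slice-normalised bounds), instead of A's per-index slice re-summation (alternative algorithm).

-- ===== PORT A =====
-- inner 'for index in range(len(sequence)): if … : FPT = index; append; break'
def aFind (sequence : List Int) (n_FPT n_period : Int) : List Int → Option Int
  | [] => none
  | index :: rest =>
    if index + n_period ≤ (sequence.length : Int) ∧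
        (PySem.List.slice sequence (some index) (some (index + n_period))).sum > n_FPT
    then some index
    else aFind sequence n_FPT n_period rest

def t_FPT (cycle_sequence_dict : List (Int × List (List Int))) (n_FPT : Int) (n_period : Int) : List (Int × List (Option Int)) :=
  cycle_sequence_dict.foldl (fun t_FPT_dict kv =>
    let bearing := kv.2
    let acc := (PySem.List.pyRange 0 (bearing.length : Int) 1).foldl (fun acc i =>
        let sequence := PySem.List.pyGetD bearing i []
        let acc2 := match aFind sequence n_FPT n_period (PySem.List.pyRange 0 (sequence.length : Int) 1) with
          | some FPT => acc ++ [some FPT]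
          | none => acc
        if (acc2.length : Int) < i + 1 then acc2 ++ [none] else acc2) ([] : List (Option Int))
    t_FPT_dict ++ [(kv.1, acc)]) []

-- ===== PORT B =====
-- pref = [0]; for x in seq: pref.append(pref[-1] + x)
def bPref (seq : List Int) : List Int :=
  seq.foldl (fun pref x => pref ++ [PySem.List.pyGetD pref (-1) 0 + x]) [0]

-- slice_sum: 'a, b, _ = slice(i, j).indices(len(pref) - 1); pref[b] - pref[a] if b > a else 0'
-- slice.indices with step 1 is ported by hand as PySem.List.clampIdx on each bound (exact: both clamp an Int bound into [0, n] with Python's negative-index rule)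
def bSliceSum (pref : List Int) (i j : Int) : Int :=
  let n := pref.length - 1
  let a := PySem.List.clampIdx n i
  let b := PySem.List.clampIdx n j
  if b > a then PySem.List.pyGetD pref (b : Int) 0 - PySem.List.pyGetD pref (a : Int) 0 else 0

-- 'for i in range(len(seq)): if i + n_period <= len(seq) and slice_sum(...) > n_FPT: found = i; break'
def bFind (pref : List Int) (L n_FPT n_period : Int) : List Int → Option Int
  | [] => none
  | i :: rest =>
    if i + n_period ≤ L ∧ bSliceSum pref i (i + n_period) > n_FPT then some i
    else bFind pref L n_FPT n_period rest

def bSeq (seq : List Int) (n_FPT n_period : Int) : Option Int :=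
  bFind (bPref seq) (seq.length : Int) n_FPT n_period
    (PySem.List.pyRange 0 (seq.length : Int) 1)

def t_FPT_alt (cycle_sequence_dict : List (Int × List (List Int))) (n_FPT : Int) (n_period : Int) : List (Int × List (Option Int)) :=
  cycle_sequence_dict.map (fun kv => (kv.1, kv.2.map (fun s => bSeq s n_FPT n_period)))

-- ===== PRECONDITION & SPEC =====
def Spec_t_FPT (cycle_sequence_dict : List (Int × List (List Int))) (n_FPT : Int) (n_period : Int) (out : List (Int × List (Option Int))) : Prop := out = t_FPT_alt cycle_sequence_dict n_FPT n_period
instance (cycle_sequence_dict : List (Int × List (List Int))) (n_FPT : Int) (n_period : Int) (out : List (Int × List (Option Int))) : Decidable (Spec_t_FPT cycle_sequence_dict n_FPT n_period out) := by unfold Spec_t_FPT; infer_instance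

-- ===== CLAIM (what is proved, stated in full; the proofs are below) =====
def Claim_equal_t_FPT : Prop := ∀ (cycle_sequence_dict : List (Int × List (List Int))) (n_FPT : Int) (n_period : Int), Dom_t_FPT cycle_sequence_dict n_FPT n_period → Spec_t_FPT cycle_sequence_dict n_FPT n_period (t_FPT cycle_sequence_dict n_FPT n_period)

-- ===== LEMMAS AND PROOFS =====

-- the prefix list really is the list of prefix sums
lemma bPref_eq (xs : List Int) :
    bPref xs = (List.range (xs.length + 1)).map (fun k => (xs.take k).sum) := by
  unfold bPref
  induction xs using List.reverseRecOn with
  | nil => simp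
  | append_singleton ys x ih =>
    rw [List.foldl_append, ih]
    simp only [List.foldl_cons, List.foldl_nil]
    have hM : (List.range (ys.length + 1)).map (fun k => (ys.take k).sum)
        = (List.range ys.length).map (fun k => (ys.take k).sum) ++ [ys.sum] := by
      rw [List.range_succ, List.map_append]
      simp
    rw [hM, PySem.List.pyGetD_neg_one_append_singleton]
    have hlen : (ys ++ [x]).length + 1 = (ys.length + 1) + 1 := by simp
    rw [hlen, List.range_succ, List.map_append]
    congr 1
    · rw [← hM]
      exact (List.map_congr_left (fun k hk => by
        rw [List.mem_range] at hk
        rw [List.take_append_of_le_length (by omega)])).symm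
    · simp

lemma bPref_get (xs : List Int) (e : Int) (h0 : 0 ≤ e) (h1 : e ≤ (xs.length : Int)) :
    PySem.List.pyGetD (bPref xs) e 0 = (xs.take e.toNat).sum := by
  rw [bPref_eq]
  rw [PySem.List.pyGetD_eq_getElem _ 0 h0 (by simp; omega)]
  simp

lemma sum_drop_take (xs : List Int) (a k : Nat) :
    ((xs.drop a).take k).sum = (xs.take (a + k)).sum - (xs.take a).sum := by
  rw [List.take_add, List.sum_append]; ring

-- A's slice sum = B's prefix-sum read, for arbitrary Int bounds
lemma cond_eq (xs : List Int) (i j : Int) :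
    (PySem.List.slice xs (some i) (some j)).sum = bSliceSum (bPref xs) i j := by
  have hlen : (bPref xs).length - 1 = xs.length := by rw [bPref_eq]; simp
  have hsl : PySem.List.slice xs (some i) (some j)
      = (xs.drop (PySem.List.clampIdx xs.length i)).take
          (PySem.List.clampIdx xs.length j - PySem.List.clampIdx xs.length i) := rfl
  simp only [bSliceSum, hlen]
  set ca := PySem.List.clampIdx xs.length i with hca
  set cb := PySem.List.clampIdx xs.length j with hcb
  have hcaL : ca ≤ xs.length := PySem.List.clampIdx_le _ _
  have hcbL : cb ≤ xs.length := PySem.List.clampIdx_le _ _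
  rw [hsl]
  by_cases h : ca < cb
  · rw [if_pos h, sum_drop_take]
    rw [bPref_get _ _ (Int.natCast_nonneg _) (by exact_mod_cast hcbL),
        bPref_get _ _ (Int.natCast_nonneg _) (by exact_mod_cast hcaL)]
    rw [Int.toNat_natCast, Int.toNat_natCast, Nat.add_sub_cancel' (le_of_lt h)]
  · rw [if_neg h]
    have h0 : cb - ca = 0 := by omega
    rw [h0]
    simp

-- the two scans agree index by index
lemma find_eq (xs : List Int) (n_FPT n_period : Int) (idxs : List Int) :
    aFind xs n_FPT n_period idxs = bFind (bPref xs) (xs.length : Int) n_FPT n_period idxs := by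
  induction idxs with
  | nil => rfl
  | cons x rest ih =>
    simp only [aFind, bFind, cond_eq]
    split_ifs
    · rfl
    · exact ih

-- A's per-bearing loop (append found index, else append None) is a map
lemma loopA (n_FPT n_period : Int) (bearing : List (List Int)) :
    ∀ (m k : Nat) (acc : List (Option Int)), k + m = bearing.length → acc.length = k →
      (PySem.List.pyRange (k : Int) (bearing.length : Int) 1).foldl (fun acc i =>
          let sequence := PySem.List.pyGetD bearing i []
          let acc2 := match aFind sequence n_FPT n_period (PySem.List.pyRange 0 (sequence.length : Int) 1) with
            | some FPT => acc ++ [some FPT]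
            | none => acc
          if (acc2.length : Int) < i + 1 then acc2 ++ [none] else acc2) acc
        = acc ++ (bearing.drop k).map (fun s => aFind s n_FPT n_period (PySem.List.pyRange 0 (s.length : Int) 1)) := by
  intro m
  induction m with
  | zero =>
    intro k acc h1 h2
    rw [PySem.List.pyRange_one_eq_nil (by omega)]
    rw [List.drop_eq_nil_of_le (by omega)]
    simp
  | succ n IH =>
    intro k acc h1 h2
    have hklen : k < bearing.length := by omega
    rw [PySem.List.pyRange_one_cons (by exact_mod_cast Nat.cast_lt.mpr hklen), List.foldl_cons]
    have hseq : PySem.List.pyGetD bearing (k : Int) [] = bearing[k] := by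
      rw [PySem.List.pyGetD_natCast]
      exact List.getD_eq_getElem _ _ hklen
    simp only [hseq]
    have hstep : ∀ v : Option Int,
        (if (((match v with
            | some FPT => acc ++ [some FPT]
            | none => acc).length : Int)) < (k : Int) + 1 then
            (match v with
            | some FPT => acc ++ [some FPT]
            | none => acc) ++ [none]
          else (match v with
            | some FPT => acc ++ [some FPT]
            | none => acc)) = acc ++ [v] := by
      intro v
      cases v with
      | some FPT => rw [if_neg (by simp [h2])]
      | none => rw [if_pos (by simp [h2])]
    rw [hstep]
    have hcast : (k : Int) + 1 = ((k + 1 : Nat) : Int) := by push_cast; ring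
    rw [hcast, IH (k+1) _ (by omega) (by simp [h2])]
    rw [List.drop_eq_getElem_cons hklen, List.map_cons, List.append_assoc]
    rfl

-- ===== VERDICT (by name: the statement is the Claim_ definition above) =====
theorem t_FPT_spec : Claim_equal_t_FPT := by
  intro d n_FPT n_period _
  unfold Spec_t_FPT t_FPT t_FPT_alt
  rw [PySem.List.foldl_append_singleton_eq_map]
  refine List.map_congr_left ?_
  intro kv _
  have h0 := loopA n_FPT n_period kv.2 kv.2.length 0 [] (by omega) rfl
  simp only [Nat.cast_zero, List.drop_zero, List.nil_append] at h0
  rw [h0]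
  refine congrArg _ (List.map_congr_left ?_)
  intro s _
  rw [find_eq s n_FPT n_period _]
  rfl
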